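-- pv_equiv track=rewrite | github.com/Kaboom6969/movie_booking_system | main_program/Library/movie_booking_framework/seat_visualizer.py | _y_location_add
-- ===== SOURCE A (Python) =====
-- def _y_location_add(movie_seats: list,y_pointer: int) -> list:
--     if y_pointer > y_range_calculate(movie_seats)[1]:
--         raise IndexError(f"{y_pointer} is out of range of {movie_seats}!")
--     movie_seats_with_y_location: list = []
--     for index,row in enumerate(movie_seats):
--         row_as_list = list(row)
--         if (len(movie_seats) - index) == y_pointer:
--             row_as_list.extend(["4"])
--             movie_seats_with_y_location.append(row_as_list)
--         else:
--             row_as_list.extend(["2"])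
--             movie_seats_with_y_location.append(row_as_list)
--     return movie_seats_with_y_location
--
-- def y_range_calculate(movie_seats: list) -> list:
--     if not movie_seats: raise ValueError(f"{movie_seats} is empty!")
--     y_max = len(movie_seats)
--     y_min = 1
--     return [y_min,y_max]
-- ===== SOURCE B (Python) =====
-- def y_range_calculate(movie_seats: list) -> list:
--     if not movie_seats: raise ValueError(f"{movie_seats} is empty!")
--     return [1, len(movie_seats)]
--
-- def _y_location_add(movie_seats: list, y_pointer: int) -> list:
--     if y_pointer > y_range_calculate(movie_seats)[1]:
--         raise IndexError(f"{y_pointer} is out of range of {movie_seats}!")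
--
--     def go(rows):
--         # recurse to the end first; k = how many rows lie at or below this row,
--         # i.e. the row's 1-based distance from the bottom of the grid
--         if not rows:
--             return [], 0
--         rest, below = go(rows[1:])
--         k = below + 1
--         return [list(rows[0]) + ["4" if k == y_pointer else "2"]] + rest, k
--
--     return go(movie_seats)[0]
-- ===== Notes on version B (the rewrite author's own statement) =====
-- stated objective: alternative
-- what changed: Replaces A's forward enumerate-loop with per-row length arithmetic (len - index == y_pointer) by a back-to-front structural recursion that carries each row's distance from the bottom and marks the row whose distance equals y_pointer; no enumerate, no length subtraction.
import Mathlib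
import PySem

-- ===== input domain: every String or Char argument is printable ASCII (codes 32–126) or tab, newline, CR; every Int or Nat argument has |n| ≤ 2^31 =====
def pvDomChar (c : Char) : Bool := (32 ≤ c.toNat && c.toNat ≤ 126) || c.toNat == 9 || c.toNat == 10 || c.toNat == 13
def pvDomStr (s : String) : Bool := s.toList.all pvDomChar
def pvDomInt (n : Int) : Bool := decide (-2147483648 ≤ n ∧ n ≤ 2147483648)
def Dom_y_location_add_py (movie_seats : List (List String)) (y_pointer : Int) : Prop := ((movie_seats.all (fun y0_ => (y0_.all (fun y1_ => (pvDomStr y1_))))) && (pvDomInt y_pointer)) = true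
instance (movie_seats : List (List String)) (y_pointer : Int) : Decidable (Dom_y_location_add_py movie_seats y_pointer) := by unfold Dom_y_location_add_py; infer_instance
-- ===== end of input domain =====

-- B replaces A's forward enumerate-loop (len - index arithmetic per row) by a back-to-front structural recursion carrying the distance from the bottom: an alternative decomposition, same cost.


-- ===== PORT A =====
-- for index,row in enumerate(movie_seats): append row+["4"] when len-index == y_pointer else row+["2"]
def y_location_add_py (movie_seats : List (List String)) (y_pointer : Int) : List (List String) :=
  (PySem.List.enumerate movie_seats 0).foldl
    (fun acc p =>
      if ((movie_seats.length : Int) - p.1) = y_pointer then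
        acc ++ [p.2 ++ ["4"]]
      else
        acc ++ [p.2 ++ ["2"]])
    []

-- ===== PORT B =====
-- go(rows): recurse to the end first, return (rows-with-marker, distance-from-bottom of the head)
def yla_go (y_pointer : Int) : List (List String) → (List (List String) × Int)
  | [] => ([], 0)
  | r :: rs =>
    let p := yla_go y_pointer rs
    let k := p.2 + 1
    ((r ++ [if k = y_pointer then "4" else "2"]) :: p.1, k)

def y_location_add_py_alt (movie_seats : List (List String)) (y_pointer : Int) : List (List String) :=
  (yla_go y_pointer movie_seats).1

-- ===== PRECONDITION & SPEC =====
-- A raises ValueError on empty movie_seats and IndexError when y_pointer > len(movie_seats); exactly those inputs are excluded.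
def Pre_y_location_add_py (movie_seats : List (List String)) (y_pointer : Int) : Prop :=
  movie_seats ≠ [] ∧ y_pointer ≤ (movie_seats.length : Int)
instance (movie_seats : List (List String)) (y_pointer : Int) : Decidable (Pre_y_location_add_py movie_seats y_pointer) := by unfold Pre_y_location_add_py; infer_instance
def pvWitness_y_location_add_py : List (List String) × Int := ([["1", "0"], ["0"]], 2)

def Spec_y_location_add_py (movie_seats : List (List String)) (y_pointer : Int) (out : List (List String)) : Prop := out = y_location_add_py_alt movie_seats y_pointer
instance (movie_seats : List (List String)) (y_pointer : Int) (out : List (List String)) : Decidable (Spec_y_location_add_py movie_seats y_pointer out) := by unfold Spec_y_location_add_py; infer_instance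

-- ===== CLAIM (what is proved, stated in full; the proofs are below) =====
def Claim_equal_y_location_add_py : Prop := ∀ (movie_seats : List (List String)) (y_pointer : Int), Dom_y_location_add_py movie_seats y_pointer → Pre_y_location_add_py movie_seats y_pointer → Spec_y_location_add_py movie_seats y_pointer (y_location_add_py movie_seats y_pointer)

-- ===== LEMMAS AND PROOFS =====

-- A's branch-in-loop collapses to a single append of a conditional row.
theorem yla_A_map (movie_seats : List (List String)) (y_pointer : Int) :
    y_location_add_py movie_seats y_pointer =
      (PySem.List.enumerate movie_seats 0).map
        (fun p => p.2 ++ [if ((movie_seats.length : Int) - p.1) = y_pointer then "4" else "2"]) := by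
  unfold y_location_add_py
  have h : ∀ (l : List (Int × List String)) (acc : List (List String)),
      l.foldl (fun acc p =>
        if ((movie_seats.length : Int) - p.1) = y_pointer then acc ++ [p.2 ++ ["4"]]
        else acc ++ [p.2 ++ ["2"]]) acc =
      acc ++ l.map (fun p => p.2 ++ [if ((movie_seats.length : Int) - p.1) = y_pointer then "4" else "2"]) := by
    intro l
    induction l with
    | nil => simp
    | cons x xs ih =>
      intro acc
      by_cases hc : ((movie_seats.length : Int) - x.1) = y_pointer <;>
        simp [hc, ih, List.foldl_cons]
  simpa using h (PySem.List.enumerate movie_seats 0) []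

-- B's recursion: the second component is the length, the first component element-wise.
theorem yla_go_snd (y_pointer : Int) (l : List (List String)) :
    (yla_go y_pointer l).2 = (l.length : Int) := by
  induction l with
  | nil => simp [yla_go]
  | cons r rs ih => simp [yla_go, ih]

theorem yla_go_fst_length (y_pointer : Int) (l : List (List String)) :
    (yla_go y_pointer l).1.length = l.length := by
  induction l with
  | nil => simp [yla_go]
  | cons r rs ih => simp [yla_go, ih]

theorem yla_go_fst_get (y_pointer : Int) (l : List (List String))
    (i : Nat) (h : i < l.length) (h' : i < (yla_go y_pointer l).1.length) :
    (yla_go y_pointer l).1[i] =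
      l[i] ++ [if ((l.length : Int) - i) = y_pointer then "4" else "2"] := by
  induction l generalizing i with
  | nil => simp at h
  | cons r rs ih =>
    cases i with
    | zero =>
      have hcond : ((((r :: rs).length : Int) - ((0 : Nat) : Int)) = y_pointer) ↔
          ((yla_go y_pointer rs).2 + 1 = y_pointer) := by
        rw [yla_go_snd]; simp only [List.length_cons]; push_cast; omega
      simp only [yla_go, List.getElem_cons_zero]
      rw [if_congr hcond.symm rfl rfl]
    | succ j =>
      have hj : j < rs.length := by simpa using h
      have hj' : j < (yla_go y_pointer rs).1.length := by
        rw [yla_go_fst_length]; exact hj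
      have hih := ih j hj hj'
      have hcond : ((((r :: rs).length : Int) - ((j + 1 : Nat) : Int)) = y_pointer) ↔
          (((rs.length : Int) - (j : Int)) = y_pointer) := by
        simp only [List.length_cons]; push_cast; omega
      simp only [yla_go, List.getElem_cons_succ]
      rw [if_congr hcond rfl rfl]
      exact hih

theorem yla_equiv (movie_seats : List (List String)) (y_pointer : Int) :
    y_location_add_py movie_seats y_pointer = y_location_add_py_alt movie_seats y_pointer := by
  rw [yla_A_map]
  unfold y_location_add_py_alt
  apply List.ext_getElem
  · simp [PySem.List.length_enumerate, yla_go_fst_length]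
  · intro i h1 h2
    have hi : i < movie_seats.length := by
      simpa [PySem.List.length_enumerate] using h1
    rw [List.getElem_map, PySem.List.getElem_enumerate,
        yla_go_fst_get y_pointer movie_seats i hi h2]
    simp

-- ===== VERDICT (by name: the statement is the Claim_ definition above) =====
theorem y_location_add_py_spec : Claim_equal_y_location_add_py := by
  intro movie_seats y_pointer _ _
  unfold Spec_y_location_add_py
  exact yla_equiv movie_seats y_pointer
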